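-- pv_equiv track=rewrite | github.com/zhuiber/MachineLearning | midexam/midexam.py | find_friends
-- ===== SOURCE A (Python) =====
-- def calculate_distance(person1, person2):
--     # Calculate the distance between two individuals based on their positions
--     distance = abs(person1[1] - person2[1])
--     return distance
--
-- def find_friends(individuals):
--     friends_dict = {}
--
--     for person1 in individuals:
--         distances = []
--         for person2 in individuals:
--             if person1 != person2:
--                 distance = calculate_distance(person1, person2)
--                 distances.append((person2[0], distance))  # Store name and distance
--
--         # Sort distances and select the 5 closest friends
--         distances.sort(key=lambda x: x[1])
--         friends = [distances[i][0] for i in range(min(5, len(distances)))]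
--         friends_dict[person1[0]] = friends
--
--     return friends_dict
-- ===== SOURCE B (Python) =====
-- def _insert_top5(buf, item):
--     # stable bounded insert: place item after all entries with distance <= item's,
--     # keep only the 5 smallest
--     i = 0
--     while i < len(buf) and buf[i][1] <= item[1]:
--         i += 1
--     return (buf[:i] + [item] + buf[i:])[:5]
--
-- def find_friends(individuals):
--     friends_dict = {}
--     for person1 in individuals:
--         best = []
--         for person2 in individuals:
--             if person1 != person2:
--                 d = abs(person1[1] - person2[1])
--                 if len(best) == 5 and best[4][1] <= d:
--                     continue  # cannot displace any of the current 5 closest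
--                 best = _insert_top5(best, (person2[0], d))
--         friends_dict[person1[0]] = [name for name, _ in best]
--     return friends_dict
-- ===== Notes on version B (the rewrite author's own statement) =====
-- stated objective: alternative
-- what changed: Per person, instead of building the full distance list and sorting it, B keeps a bounded stable insertion buffer of the 5 closest entries in one pass, skipping candidates that cannot displace the current 5th.
import Mathlib
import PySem

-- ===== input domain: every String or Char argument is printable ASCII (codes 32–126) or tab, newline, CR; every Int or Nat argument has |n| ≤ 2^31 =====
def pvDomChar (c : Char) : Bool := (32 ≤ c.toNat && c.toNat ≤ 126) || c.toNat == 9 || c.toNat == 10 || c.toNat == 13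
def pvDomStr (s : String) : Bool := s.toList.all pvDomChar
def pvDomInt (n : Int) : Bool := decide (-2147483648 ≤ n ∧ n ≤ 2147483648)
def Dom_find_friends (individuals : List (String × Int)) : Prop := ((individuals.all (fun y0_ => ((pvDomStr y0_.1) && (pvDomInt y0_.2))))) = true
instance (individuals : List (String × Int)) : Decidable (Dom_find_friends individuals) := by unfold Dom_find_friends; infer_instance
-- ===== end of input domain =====

-- B replaces the per-person build-all-distances-then-sort with a single pass keeping a
-- bounded (≤ 5) stable insertion buffer of the current closest entries (objective: alternative).

-- ===== PORT A =====
def calculate_distance (person1 person2 : String × Int) : Int :=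
  |person1.2 - person2.2|

def find_friends (individuals : List (String × Int)) : List (String × List String) :=
  (individuals.foldl (fun friends_dict person1 =>
      let distances : List (String × Int) := individuals.foldl
        (fun acc person2 =>
          if person1 ≠ person2 then acc ++ [(person2.1, calculate_distance person1 person2)]
          else acc) []
      -- distances.sort(key=lambda x: x[1])  (in-place stable sort; rebinds the name)
      let distances := PySem.List.sorted distances (fun x => x.2)
      -- [distances[i][0] for i in range(min(5, len(distances)))]  (indices always in range)
      let friends := (PySem.List.pyRange 0 (min 5 (PySem.List.len distances))).map
        (fun i => (PySem.List.pyGetD distances i ("", 0)).1)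
      friends_dict.insert person1.1 friends)
    PySem.Dict.empty).items

-- ===== PORT B =====
-- `_insert_top5`'s while-loop scan for the first entry with strictly greater distance,
-- as structural recursion over the buffer (then the splice+truncate below).
def insertScan (item : String × Int) : List (String × Int) → List (String × Int)
  | [] => [item]
  | y :: ys => if y.2 ≤ item.2 then y :: insertScan item ys else item :: y :: ys

def insert_top5 (buf : List (String × Int)) (item : String × Int) : List (String × Int) :=
  (insertScan item buf).take 5

def find_friends_alt (individuals : List (String × Int)) : List (String × List String) :=
  (individuals.foldl (fun friends_dict person1 =>
      let best := individuals.foldl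
        (fun best person2 =>
          if person1 ≠ person2 then
            let d := |person1.2 - person2.2|
            if best.length = 5 ∧ (PySem.List.pyGetD best 4 ("", 0)).2 ≤ d then best
            else insert_top5 best (person2.1, d)
          else best) []
      friends_dict.insert person1.1 (best.map (fun nd => nd.1)))
    PySem.Dict.empty).items

-- ===== PRECONDITION & SPEC =====
def Spec_find_friends (individuals : List (String × Int)) (out : List (String × List String)) : Prop := out = find_friends_alt individuals
instance (individuals : List (String × Int)) (out : List (String × List String)) : Decidable (Spec_find_friends individuals out) := by unfold Spec_find_friends; infer_instance

-- ===== CLAIM (what is proved, stated in full; the proofs are below) =====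
def Claim_equal_find_friends : Prop := ∀ (individuals : List (String × Int)), Dom_find_friends individuals → Spec_find_friends individuals (find_friends individuals)

-- ===== LEMMAS AND PROOFS =====

theorem insertScan_eq_insertBy (x : String × Int) (l : List (String × Int)) :
    insertScan x l = PySem.List.insertBy (fun a b => decide (a.2 < b.2)) x l := by
  induction l with
  | nil => rfl
  | cons y ys ih =>
    simp only [insertScan, PySem.List.insertBy]
    by_cases h : y.2 ≤ x.2
    · rw [if_pos h, if_neg (by simpa using not_lt.mpr h), ih]
    · rw [if_neg h, if_pos (by simpa using not_le.mp h)]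

theorem take_insertScan_take (x : String × Int) :
    ∀ (k : Nat) (b : List (String × Int)),
      (insertScan x (b.take k)).take k = (insertScan x b).take k := by
  intro k b
  induction b generalizing k with
  | nil => simp
  | cons y ys ih =>
    cases k with
    | zero => simp
    | succ m =>
      simp only [List.take_succ_cons, insertScan]
      by_cases h : y.2 ≤ x.2
      · rw [if_pos h, if_pos h]
        simp only [List.take_succ_cons, ih]
      · rw [if_neg h, if_neg h]
        simp only [List.take_succ_cons]
        cases m with
        | zero => simp
        | succ m' => simp [List.take_take]

theorem take_insertScan_of_le (x : String × Int) :
    ∀ (k : Nat) (l : List (String × Int)), k ≤ l.length →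
      (∀ y ∈ l.take k, y.2 ≤ x.2) → (insertScan x l).take k = l.take k := by
  intro k l
  induction l generalizing k with
  | nil => intro hk _; have h0 : k = 0 := Nat.le_zero.mp hk; subst h0; simp
  | cons y ys ih =>
    intro hk hall
    cases k with
    | zero => simp
    | succ m =>
      have hy : y.2 ≤ x.2 := hall y (by simp)
      simp only [insertScan, if_pos hy, List.take_succ_cons]
      rw [ih m (by simpa using hk) (fun z hz => hall z (by simp [hz]))]

-- one bounded-insert step on the running take-5 of the sorted prefix
theorem step_take_sorted (ys : List (String × Int)) (x : String × Int) :
    (if ((PySem.List.sorted ys (fun v => v.2)).take 5).length = 5 ∧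
        (PySem.List.pyGetD ((PySem.List.sorted ys (fun v => v.2)).take 5) 4 ("", 0)).2 ≤ x.2
     then (PySem.List.sorted ys (fun v => v.2)).take 5
     else insert_top5 ((PySem.List.sorted ys (fun v => v.2)).take 5) x)
    = (PySem.List.insertBy (fun a b => decide (a.2 < b.2)) x (PySem.List.sorted ys (fun v => v.2))).take 5 := by
  set l := PySem.List.sorted ys (fun v => v.2) with hl
  by_cases hg : (l.take 5).length = 5 ∧ (PySem.List.pyGetD (l.take 5) 4 ("", 0)).2 ≤ x.2
  · obtain ⟨h5, hle⟩ := hg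
    have hlen : 5 ≤ l.length := by
      simpa using (by omega : min 5 l.length = 5 → 5 ≤ l.length) (by simpa using h5)
    have h4 : (PySem.List.pyGetD (l.take 5) 4 ("", 0)) = l[4]'(by omega) := by
      rw [PySem.List.pyGetD_ofNat',
        List.getD_eq_getElem _ _ (by simp; omega)]
      exact List.getElem_take
    have hall : ∀ y ∈ l.take 5, y.2 ≤ x.2 := by
      intro y hy
      obtain ⟨i, hi, rfl⟩ := List.mem_iff_getElem.mp hy
      have hi5 : i < 5 := by simpa using lt_of_lt_of_le hi (by simp)
      have := PySem.List.key_sorted_getElem_mono ys (fun v => v.2)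
        (show i ≤ 4 by omega) (show 4 < (PySem.List.sorted ys (fun v => v.2)).length from by rw [← hl]; omega)
      rw [List.getElem_take]
      calc l[i].2 ≤ l[4].2 := by simpa [← hl] using this
        _ ≤ x.2 := by rw [h4] at hle; exact hle
    rw [if_pos ⟨h5, hle⟩, ← insertScan_eq_insertBy,
        take_insertScan_of_le x 5 l hlen hall]
  · rw [if_neg hg]
    show (insertScan x (l.take 5)).take 5 = _
    rw [take_insertScan_take, insertScan_eq_insertBy]

-- fold of the guarded bounded insert over any item list = take 5 of the stable sort
theorem fold_step_eq_take_sorted (ys : List (String × Int)) :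
    ys.foldl (fun best x =>
        if best.length = 5 ∧ (PySem.List.pyGetD best 4 ("", 0)).2 ≤ x.2 then best
        else insert_top5 best x) []
      = (PySem.List.sorted ys (fun v => v.2)).take 5 := by
  induction ys using List.reverseRecOn with
  | nil => rfl
  | append_singleton ys x ih =>
    rw [List.foldl_append, List.foldl_cons, List.foldl_nil, ih]
    rw [PySem.List.sorted_eq_foldl_insertBy (ys ++ [x]), List.foldl_append,
        List.foldl_cons, List.foldl_nil, ← PySem.List.sorted_eq_foldl_insertBy]
    exact step_take_sorted ys x

theorem map_getD_range_eq_take {α : Type} (l : List α) (d : α) :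
    ∀ (m : Nat), m ≤ l.length → (List.range m).map (fun k => l.getD k d) = l.take m := by
  intro m hm
  induction m with
  | zero => simp
  | succ n ih =>
    rw [List.range_succ, List.map_append, ih (by omega), List.take_add_one]
    simp [List.getD, List.getElem?_eq_getElem (show n < l.length by omega)]

-- A's index comprehension is map-fst of take 5 of the sorted list
theorem friends_comprehension (l : List (String × Int)) :
    (PySem.List.pyRange 0 (min 5 (PySem.List.len l))).map
        (fun i => (PySem.List.pyGetD l i ("", 0)).1)
      = (l.take 5).map (fun nd => nd.1) := by
  have hmin : min 5 (PySem.List.len l) = ((min 5 l.length : Nat) : Int) := by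
    simp [PySem.List.len]
  rw [hmin, PySem.List.pyRange_zero_natCast, List.map_map]
  have hfun : ((fun i => (PySem.List.pyGetD l i ("", 0)).1) ∘ fun k : Nat => (k : Int))
      = fun k : Nat => (l.getD k ("", 0)).1 := by
    funext k
    simp [Function.comp, PySem.List.pyGetD_natCast]
  rw [hfun]
  have := map_getD_range_eq_take l ("", 0) (min 5 l.length) (by omega)
  have hmap : (List.range (min 5 l.length)).map (fun k => (l.getD k ("", 0)).1)
      = ((List.range (min 5 l.length)).map (fun k => l.getD k ("", 0))).map (fun nd => nd.1) := by
    rw [List.map_map]; rfl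
  rw [hmap, this]
  congr 1
  rw [← List.take_take, List.take_length]

-- per-person: B's buffer maps to A's friends list
theorem per_person (individuals : List (String × Int)) (p : String × Int) :
    (individuals.foldl
        (fun best q =>
          if p ≠ q then
            let d := |p.2 - q.2|
            if best.length = 5 ∧ (PySem.List.pyGetD best 4 ("", 0)).2 ≤ d then best
            else insert_top5 best (q.1, d)
          else best) []).map (fun nd => nd.1)
      = (PySem.List.pyRange 0 (min 5 (PySem.List.len (PySem.List.sorted
            (individuals.foldl (fun acc q =>
              if p ≠ q then acc ++ [(q.1, calculate_distance p q)] else acc) [])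
            (fun v => v.2))))).map
          (fun i => (PySem.List.pyGetD (PySem.List.sorted
            (individuals.foldl (fun acc q =>
              if p ≠ q then acc ++ [(q.1, calculate_distance p q)] else acc) [])
            (fun v => v.2)) i ("", 0)).1) := by
  rw [friends_comprehension]
  have hA : (individuals.foldl (fun acc q =>
        if p ≠ q then acc ++ [(q.1, calculate_distance p q)] else acc) [])
      = ((individuals.filter (fun q => decide (p ≠ q))).map
          (fun q => (q.1, calculate_distance p q))) := by
    simpa using PySem.List.foldl_append_if (fun q => decide (p ≠ q))
      (fun q => (q.1, calculate_distance p q)) individuals []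
  rw [hA]
  have hB : (individuals.foldl
        (fun best q =>
          if p ≠ q then
            let d := |p.2 - q.2|
            if best.length = 5 ∧ (PySem.List.pyGetD best 4 ("", 0)).2 ≤ d then best
            else insert_top5 best (q.1, d)
          else best) [])
      = ((individuals.filter (fun q => decide (p ≠ q))).map
            (fun q => (q.1, calculate_distance p q))).foldl
          (fun best x =>
            if best.length = 5 ∧ (PySem.List.pyGetD best 4 ("", 0)).2 ≤ x.2 then best
            else insert_top5 best x) [] := by
    rw [List.foldl_map, List.foldl_filter]
    simp only [decide_eq_true_eq, calculate_distance]
  rw [hB, fold_step_eq_take_sorted]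

-- ===== VERDICT (by name: the statement is the Claim_ definition above) =====
theorem find_friends_spec : Claim_equal_find_friends := by
  intro individuals _
  unfold Spec_find_friends find_friends find_friends_alt
  congr 1
  apply PySem.List.foldl_congr_mem
  intro acc p _
  simp only []
  rw [per_person individuals p]
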